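-- pv_equiv track=rewrite | github.com/kuljot-kaur/Complyt | backend/app/services/encryption.py | mask_value
-- ===== SOURCE A (Python) =====
-- def mask_value(value: str) -> str:
-- 	# Keep first char per token visible and mask remaining alpha chars.
-- 	masked_tokens: list[str] = []
-- 	for token in value.split(" "):
-- 		if not token:
-- 			masked_tokens.append(token)
-- 			continue
-- 		first = token[0]
-- 		rest = "".join("*" if c.isalpha() else c for c in token[1:])
-- 		masked_tokens.append(first + rest)
-- 	return " ".join(masked_tokens)
-- ===== SOURCE B (Python) =====
-- def mask_value(value: str) -> str:
--     # Single stateful pass: no token list; a char is kept if it starts a token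
--     # (start of string or right after a space) or is non-alphabetic.
--     out = []
--     at_token_start = True
--     for c in value:
--         out.append(c if at_token_start or not c.isalpha() else "*")
--         at_token_start = c == " "
--     return "".join(out)
-- ===== Notes on version B (the rewrite author's own statement) =====
-- stated objective: simpler
-- what changed: Replaced split-into-tokens / per-token masking / re-join with one linear scan carrying a boolean token-start flag and no intermediate token list.
import Mathlib
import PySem

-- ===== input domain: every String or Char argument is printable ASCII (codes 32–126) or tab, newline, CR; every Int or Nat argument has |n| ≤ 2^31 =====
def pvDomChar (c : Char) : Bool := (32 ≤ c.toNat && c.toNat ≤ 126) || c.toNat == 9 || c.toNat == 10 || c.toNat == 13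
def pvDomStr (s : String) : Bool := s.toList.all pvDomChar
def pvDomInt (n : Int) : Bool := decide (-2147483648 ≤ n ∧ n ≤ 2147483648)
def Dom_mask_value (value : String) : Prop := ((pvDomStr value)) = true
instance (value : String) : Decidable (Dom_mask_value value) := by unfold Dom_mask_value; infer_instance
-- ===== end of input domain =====

-- B replaces A's split-tokens/mask/join with one linear scan carrying a token-start flag (simpler decomposition).


-- ===== PORT A =====
-- per-token masking: keep the first char, mask alpha chars in the rest
def maskTokenA (t : List Char) : List Char :=
  match t with
  | [] => []                                  -- 'if not token: append token'
  | first :: rest => first :: rest.map (fun c => if PySem.Chars.isalpha c then '*' else c)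

def mask_value (value : String) : String :=
  String.ofList (PySem.Chars.join [' ']
    ((PySem.Chars.splitOn value.toList [' ']).map maskTokenA))

-- ===== PORT B =====
def mask_value_alt (value : String) : String :=
  String.ofList (value.toList.foldl
    (fun (st : List Char × Bool) c =>
      (st.1 ++ [if st.2 || !(PySem.Chars.isalpha c) then c else '*'], c == ' '))
    ([], true)).1

-- ===== PRECONDITION & SPEC =====
def Spec_mask_value (value : String) (out : String) : Prop := out = mask_value_alt value
instance (value : String) (out : String) : Decidable (Spec_mask_value value out) := by unfold Spec_mask_value; infer_instance

-- ===== CLAIM (what is proved, stated in full; the proofs are below) =====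
def Claim_equal_mask_value : Prop := ∀ (value : String), Dom_mask_value value → Spec_mask_value value (mask_value value)

-- ===== LEMMAS AND PROOFS =====

-- reference splitter: mySplit pre cs = split of (pre ++ cs) whose first piece already holds pre
def mySplit (pre : List Char) : List Char → List (List Char)
  | [] => [pre]
  | c :: cs => if c = ' ' then pre :: mySplit [] cs else mySplit (pre ++ [c]) cs

-- B's scan as a pure function of the token-start flag
def gScan (b : Bool) : List Char → List Char
  | [] => []
  | c :: cs => (if b || !(PySem.Chars.isalpha c) then c else '*') :: gScan (c == ' ') cs

lemma go_eq_mySplit : ∀ (fuel : ℕ) (l cur : List Char) (accs : List (List Char)),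
    l.length < fuel →
    PySem.Chars.splitOn.go [' '] fuel l cur accs = accs.reverse ++ mySplit cur.reverse l := by
  intro fuel
  induction fuel with
  | zero => intro l cur accs h; omega
  | succ n ih =>
    intro l cur accs h
    cases l with
    | nil => simp [PySem.Chars.splitOn.go, mySplit]
    | cons c rest =>
      rw [PySem.Chars.splitOn.go]
      by_cases hc : c = ' '
      · subst hc
        simp only [List.isPrefixOf, BEq.rfl, Bool.true_and, if_true]
        rw [show List.drop [' '].length (' ' :: rest) = rest from rfl]
        rw [ih rest [] (cur.reverse :: accs) (by simp at h ⊢; omega)]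
        simp [mySplit]
      · have hpre : ([' '].isPrefixOf (c :: rest)) = false := by
          simp [List.isPrefixOf]; exact fun h' => hc h'.symm
        rw [hpre]
        simp only [Bool.false_eq_true, if_false]
        rw [ih rest (c :: cur) accs (by simp at h ⊢; omega)]
        simp [mySplit, hc]

lemma splitOn_eq_mySplit (cs : List Char) :
    PySem.Chars.splitOn cs [' '] = mySplit [] cs := by
  unfold PySem.Chars.splitOn
  rw [go_eq_mySplit (cs.length + 1) cs [] [] (by omega)]
  simp

lemma mySplit_ne_nil : ∀ (cs pre : List Char), mySplit pre cs ≠ [] := by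
  intro cs
  induction cs with
  | nil => intro pre; simp [mySplit]
  | cons c cs ih =>
    intro pre
    by_cases hc : c = ' ' <;> simp [mySplit, hc, ih]

lemma maskTokenA_snoc (pre : List Char) (c : Char) :
    maskTokenA (pre ++ [c])
      = maskTokenA pre ++ [if pre.isEmpty || !(PySem.Chars.isalpha c) then c else '*'] := by
  cases pre with
  | nil => simp [maskTokenA]
  | cons p ps =>
    simp [maskTokenA]
    by_cases h : PySem.Chars.isalpha c <;> simp [h]

lemma join_mask_mySplit : ∀ (cs pre : List Char),
    PySem.Chars.join [' '] ((mySplit pre cs).map maskTokenA)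
      = maskTokenA pre ++ gScan pre.isEmpty cs := by
  intro cs
  induction cs with
  | nil => intro pre; simp [mySplit, gScan, PySem.Chars.join_singleton]
  | cons c cs ih =>
    intro pre
    by_cases hc : c = ' '
    · subst hc
      obtain ⟨q, t, hsp⟩ : ∃ q t, mySplit [] cs = q :: t := by
        cases h' : mySplit [] cs with
        | nil => exact absurd h' (mySplit_ne_nil cs [])
        | cons q t => exact ⟨q, t, rfl⟩
      have hih := ih []
      rw [hsp] at hih
      rw [show mySplit pre (' ' :: cs) = pre :: mySplit [] cs from by simp [mySplit], hsp]
      simp only [List.map_cons] at hih ⊢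
      rw [PySem.Chars.join_cons_cons, hih]
      simp [gScan, maskTokenA, PySem.Chars.isalpha, PySem.Chars.isupper, PySem.Chars.islower]
    · rw [show mySplit pre (c :: cs) = mySplit (pre ++ [c]) cs from by simp [mySplit, hc],
        ih (pre ++ [c]), maskTokenA_snoc]
      have h1 : (pre ++ [c]).isEmpty = false := by simp
      have h2 : (c == ' ') = false := by simp [hc]
      simp [gScan, h1, h2]

lemma foldl_fst : ∀ (cs acc : List Char) (b : Bool),
    (cs.foldl (fun (st : List Char × Bool) c =>
      (st.1 ++ [if st.2 || !(PySem.Chars.isalpha c) then c else '*'], c == ' ')) (acc, b)).1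
      = acc ++ gScan b cs := by
  intro cs
  induction cs with
  | nil => intro acc b; simp [gScan]
  | cons c cs ih =>
    intro acc b
    simp only [List.foldl_cons]
    rw [ih]
    simp [gScan]

-- ===== VERDICT (by name: the statement is the Claim_ definition above) =====
theorem mask_value_spec : Claim_equal_mask_value := by
  intro value _
  unfold Spec_mask_value mask_value mask_value_alt
  rw [splitOn_eq_mySplit, join_mask_mySplit, foldl_fst]
  simp [maskTokenA]
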